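-- pv_equiv track=rewrite | github.com/Crissal1995/new_moodle_importer | course_folder_generator/utils.py | check_video_uri
-- ===== SOURCE A (Python) =====
-- def check_video_uri(video_uri: str):
--     video_uri_parts = video_uri.split("/")
--     if len(video_uri_parts) < 2:
--         return True
--
--     first = video_uri_parts[0]
--     for element in video_uri_parts[1:]:
--         if element != first:
--             return False
--
--     return True
-- ===== SOURCE B (Python) =====
-- def check_video_uri(video_uri: str):
--     first, _, _ = video_uri.partition("/")
--     return video_uri == "/".join([first] * (video_uri.count("/") + 1))
-- ===== Notes on version B (the rewrite author's own statement) =====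
-- stated objective: alternative
-- what changed: Instead of scanning the split parts and comparing each against the first, B rebuilds the unique all-equal URI (the part before the first slash, repeated slash-count+1 times, joined with '/') and tests string equality with the input; no iteration over the parts list remains.
import Mathlib
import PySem

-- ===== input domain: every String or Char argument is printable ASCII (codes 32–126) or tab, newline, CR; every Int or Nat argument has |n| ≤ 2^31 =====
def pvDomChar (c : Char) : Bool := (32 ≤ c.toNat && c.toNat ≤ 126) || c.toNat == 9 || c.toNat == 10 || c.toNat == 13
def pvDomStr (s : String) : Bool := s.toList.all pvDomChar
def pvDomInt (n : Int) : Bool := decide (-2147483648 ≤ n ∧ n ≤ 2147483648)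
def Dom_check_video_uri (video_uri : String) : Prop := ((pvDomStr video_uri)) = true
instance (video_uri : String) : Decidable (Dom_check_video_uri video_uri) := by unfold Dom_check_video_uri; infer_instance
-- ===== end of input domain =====

-- B replaces A's scan over the parts by string reconstruction: it rebuilds the unique
-- all-equal URI with the same head and slash count and compares it with the input (alternative).

-- ===== PORT A =====
-- the 'for element in video_uri_parts[1:]' loop with its early return
def pvCheckLoop (first : String) : List String → Bool
  | [] => true
  | e :: rest => if e ≠ first then false else pvCheckLoop first rest

def check_video_uri (video_uri : String) : Bool :=
  let parts := (PySem.Str.split? video_uri "/").getD []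
  if parts.length < 2 then true
  else
    let first := parts.headD ""   -- parts[0]; nonempty under the guard
    pvCheckLoop first (PySem.List.slice parts (some 1) none)

-- ===== PORT B =====
def check_video_uri_alt (video_uri : String) : Bool :=
  -- video_uri.partition("/")[0], ported by hand (PySem has no partition): the characters
  -- before the first '/'; exact for this single-character separator.
  let first := String.ofList (video_uri.toList.takeWhile (fun c => !(c == '/')))
  let n := PySem.Str.count video_uri "/"
  video_uri == PySem.Str.join "/" (List.replicate (n + 1) first)

-- ===== PRECONDITION & SPEC =====
def Spec_check_video_uri (video_uri : String) (out : Bool) : Prop := out = check_video_uri_alt video_uri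
instance (video_uri : String) (out : Bool) : Decidable (Spec_check_video_uri video_uri out) := by unfold Spec_check_video_uri; infer_instance

-- ===== CLAIM (what is proved, stated in full; the proofs are below) =====
def Claim_equal_check_video_uri : Prop := ∀ (video_uri : String), Dom_check_video_uri video_uri → Spec_check_video_uri video_uri (check_video_uri video_uri)

-- ===== LEMMAS AND PROOFS =====

-- reference single-char split on '/'
def pvSplit1 : List Char → List (List Char)
  | [] => [[]]
  | c :: t => if c == '/' then [] :: pvSplit1 t else (pvSplit1 t).modifyHead (c :: ·)

-- reference join with '/'
def pvJoin1 : List (List Char) → List Char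
  | [] => []
  | [a] => a
  | a :: b :: rest => a ++ '/' :: pvJoin1 (b :: rest)

theorem pvSplit1_ne_nil (l : List Char) : pvSplit1 l ≠ [] := by
  cases l with
  | nil => simp [pvSplit1]
  | cons c t =>
    simp only [pvSplit1]
    split
    · simp
    · cases h : pvSplit1 t with
      | nil => exact absurd h (pvSplit1_ne_nil t)
      | cons a r => simp [List.modifyHead]

theorem pv_go_eq : ∀ (fuel : Nat) (l cur : List Char) (acc : List (List Char)),
    l.length < fuel →
    PySem.Chars.splitOn.go ['/'] fuel l cur acc =
      acc.reverse ++ (pvSplit1 l).modifyHead (cur.reverse ++ ·) := by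
  intro fuel
  induction fuel with
  | zero => intro l cur acc h; omega
  | succ fuel ih =>
    intro l cur acc h
    cases l with
    | nil =>
      simp [PySem.Chars.splitOn.go, pvSplit1]
    | cons c rest =>
      by_cases hc : c = '/'
      · subst hc
        have hpre : List.isPrefixOf ['/'] ('/' :: rest) = true := by
          simp [List.isPrefixOf]
        rw [PySem.Chars.splitOn.go]
        simp only [hpre, if_true]
        have hd : List.drop (['/'] : List Char).length ('/' :: rest) = rest := rfl
        rw [hd, ih rest [] (cur.reverse :: acc) (by simpa using Nat.lt_of_succ_lt_succ h)]
        simp only [pvSplit1, beq_self_eq_true, if_true, List.reverse_cons, List.reverse_nil,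
          List.nil_append, List.append_assoc, List.singleton_append, List.modifyHead]
        cases pvSplit1 rest <;> simp
      · have hpre : List.isPrefixOf ['/'] (c :: rest) = false := by
          simp [List.isPrefixOf]
          exact fun hh => absurd hh.symm hc
        rw [PySem.Chars.splitOn.go]
        simp only [hpre, Bool.false_eq_true, if_false]
        rw [ih rest (c :: cur) acc (by simpa using Nat.lt_of_succ_lt_succ h)]
        have : pvSplit1 (c :: rest) = (pvSplit1 rest).modifyHead (c :: ·) := by
          simp [pvSplit1, hc]
        rw [this, List.modifyHead_modifyHead]
        have hf : (fun x => (c :: cur).reverse ++ x) = ((fun x => cur.reverse ++ x) ∘ fun x => c :: x) := by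
          funext x; simp
        rw [hf]

theorem pvSplitOn_eq (l : List Char) : PySem.Chars.splitOn l ['/'] = pvSplit1 l := by
  unfold PySem.Chars.splitOn
  rw [pv_go_eq (l.length + 1) l [] [] (Nat.lt_succ_self _)]
  cases h : pvSplit1 l with
  | nil => exact absurd h (pvSplit1_ne_nil l)
  | cons a r => simp [List.modifyHead]

theorem pv_count_go_eq : ∀ (fuel : Nat) (l : List Char) (acc : Nat),
    l.length ≤ fuel →
    PySem.Chars.count.go ['/'] fuel l acc = acc + l.count '/' := by
  intro fuel
  induction fuel with
  | zero =>
    intro l acc h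
    have : l = [] := List.eq_nil_of_length_eq_zero (Nat.le_zero.mp h)
    subst this
    simp [PySem.Chars.count.go]
  | succ fuel ih =>
    intro l acc h
    cases l with
    | nil => simp [PySem.Chars.count.go]
    | cons c rest =>
      by_cases hc : c = '/'
      · subst hc
        have hpre : List.isPrefixOf ['/'] ('/' :: rest) = true := by
          simp [List.isPrefixOf]
        rw [PySem.Chars.count.go]
        simp only [hpre, if_true]
        have hd : List.drop (['/'] : List Char).length ('/' :: rest) = rest := rfl
        rw [hd, ih rest (acc + 1) (by simpa using Nat.le_of_succ_le_succ h)]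
        simp
        omega
      · have hpre : List.isPrefixOf ['/'] (c :: rest) = false := by
          simp [List.isPrefixOf]
          exact fun hh => absurd hh.symm hc
        rw [PySem.Chars.count.go]
        simp only [hpre, Bool.false_eq_true, if_false]
        rw [ih rest acc (by simpa using Nat.le_of_succ_le_succ h)]
        simp [hc]

theorem pvCount_eq (l : List Char) : PySem.Chars.count l ['/'] = l.count '/' := by
  unfold PySem.Chars.count
  simp [pv_count_go_eq l.length l 0 (le_refl _)]

theorem pvJoin1_eq_join (ps : List (List Char)) : PySem.Chars.join ['/'] ps = pvJoin1 ps := by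
  induction ps with
  | nil => simp [PySem.Chars.join, List.intercalate, pvJoin1]
  | cons a rest ih =>
    cases rest with
    | nil => simp [PySem.Chars.join, List.intercalate, pvJoin1]
    | cons b r =>
      simp only [pvJoin1]
      rw [← ih]
      simp [PySem.Chars.join, List.intercalate, List.intersperse]

-- join1 ∘ split1 = id
theorem pvJoin1_modifyHead (c : Char) (P : List (List Char)) (h : P ≠ []) :
    pvJoin1 (P.modifyHead (c :: ·)) = c :: pvJoin1 P := by
  cases P with
  | nil => exact absurd rfl h
  | cons a r =>
    cases r with
    | nil => simp [List.modifyHead, pvJoin1]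
    | cons b t => simp [List.modifyHead, pvJoin1]

theorem pvJoin1_cons_ne_nil (P : List (List Char)) (h : P ≠ []) :
    pvJoin1 ([] :: P) = '/' :: pvJoin1 P := by
  cases P with
  | nil => exact absurd rfl h
  | cons a r => simp [pvJoin1]

theorem pvJoin1_split1 (l : List Char) : pvJoin1 (pvSplit1 l) = l := by
  induction l with
  | nil => simp [pvSplit1, pvJoin1]
  | cons c t ih =>
    by_cases hc : c = '/'
    · subst hc
      simp only [pvSplit1, beq_self_eq_true, if_true]
      rw [pvJoin1_cons_ne_nil _ (pvSplit1_ne_nil t), ih]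
    · simp only [pvSplit1, beq_iff_eq, hc, if_false]
      rw [pvJoin1_modifyHead c _ (pvSplit1_ne_nil t), ih]

theorem pvSplit1_length (l : List Char) : (pvSplit1 l).length = l.count '/' + 1 := by
  induction l with
  | nil => simp [pvSplit1]
  | cons c t ih =>
    by_cases hc : c = '/'
    · subst hc; simp [pvSplit1, ih]
    · simp [pvSplit1, hc, ih]

theorem pvSplit1_head (l : List Char) :
    (pvSplit1 l).headD [] = l.takeWhile (fun c => !(c == '/')) := by
  induction l with
  | nil => simp [pvSplit1]
  | cons c t ih =>
    by_cases hc : c = '/'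
    · subst hc; simp [pvSplit1, List.takeWhile]
    · simp only [pvSplit1, beq_iff_eq, hc, if_false, List.takeWhile]
      cases h : pvSplit1 t with
      | nil => exact absurd h (pvSplit1_ne_nil t)
      | cons a r =>
        simp only [h, List.headD_cons] at ih
        have hcb : (!(c == '/')) = true := by simp [hc]
        simp [List.modifyHead, ih, hcb]

theorem pvHead_slashfree (l : List Char) : '/' ∉ l.takeWhile (fun c => !(c == '/')) := by
  intro h
  have := List.mem_takeWhile_imp h
  simp at this

theorem pvSplit1_slashfree (h : List Char) (hh : '/' ∉ h) : pvSplit1 h = [h] := by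
  induction h with
  | nil => simp [pvSplit1]
  | cons c t ih =>
    have hc : c ≠ '/' := fun e => hh (e ▸ List.mem_cons_self ..)
    have ht : '/' ∉ t := fun m => hh (List.mem_cons_of_mem _ m)
    simp only [pvSplit1, beq_iff_eq]
    rw [if_neg (fun e => hc e), ih ht]
    simp [List.modifyHead]

theorem pvSplit1_append (h t : List Char) (hh : '/' ∉ h) :
    pvSplit1 (h ++ '/' :: t) = h :: pvSplit1 t := by
  induction h with
  | nil => simp [pvSplit1]
  | cons c r ih =>
    have hc : c ≠ '/' := fun e => hh (e ▸ List.mem_cons_self ..)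
    have hr : '/' ∉ r := fun m => hh (List.mem_cons_of_mem _ m)
    simp only [List.cons_append, pvSplit1, beq_iff_eq]
    rw [if_neg hc, ih hr]
    simp [List.modifyHead]

theorem pvSplit1_join_replicate (k : Nat) (h : List Char) (hh : '/' ∉ h) :
    pvSplit1 (pvJoin1 (List.replicate (k + 1) h)) = List.replicate (k + 1) h := by
  induction k with
  | zero => simp [pvJoin1, pvSplit1_slashfree h hh]
  | succ k ih =>
    have : pvJoin1 (List.replicate (k + 2) h) = h ++ '/' :: pvJoin1 (List.replicate (k + 1) h) := by
      simp [List.replicate_succ, pvJoin1]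
    rw [this, pvSplit1_append _ _ hh, ih, ← List.replicate_succ]

-- the central characterisation: the input equals the rebuilt all-equal URI
-- iff every part equals the head part
theorem pvMain (l : List Char) :
    (l = pvJoin1 (List.replicate (l.count '/' + 1) (l.takeWhile (fun c => !(c == '/'))))) ↔
      (∀ x ∈ pvSplit1 l, x = l.takeWhile (fun c => !(c == '/'))) := by
  set h := l.takeWhile (fun c => !(c == '/')) with hh
  constructor
  · intro he x hx
    have := pvSplit1_join_replicate (l.count '/') h (pvHead_slashfree l)
    rw [← he] at this
    rw [this] at hx
    exact (List.eq_of_mem_replicate hx)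
  · intro hall
    have hrep : pvSplit1 l = List.replicate (l.count '/' + 1) h :=
      List.eq_replicate_iff.mpr ⟨pvSplit1_length l, hall⟩
    conv_lhs => rw [← pvJoin1_split1 l, hrep]

-- the A-side loop checks "all elements equal first"
theorem pvCheckLoop_eq_true_iff (a : String) (l : List String) :
    pvCheckLoop a l = true ↔ ∀ x ∈ l, x = a := by
  induction l with
  | nil => simp [pvCheckLoop]
  | cons b t ih =>
    by_cases h : b = a
    · simp [pvCheckLoop, h, ih]
    · simp [pvCheckLoop, h]

theorem check_eq (s : String) : check_video_uri s = check_video_uri_alt s := by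
  unfold check_video_uri check_video_uri_alt
  have hsplit : (PySem.Str.split? s "/").getD [] = (pvSplit1 s.toList).map String.ofList := by
    simp [PySem.Str.split?, PySem.Chars.split?, pvSplitOn_eq]
  have hcount : PySem.Str.count s "/" = s.toList.count '/' := by
    simp only [PySem.Str.count]
    have : "/".toList = ['/'] := rfl
    rw [this, pvCount_eq]
  set h := s.toList.takeWhile (fun c => !(c == '/')) with hhdef
  -- B as a proposition
  have hB : (s == PySem.Str.join "/" (List.replicate (s.toList.count '/' + 1) (String.ofList h))) =
      decide (∀ x ∈ pvSplit1 s.toList, x = h) := by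
    have hjoin : (PySem.Str.join "/" (List.replicate (s.toList.count '/' + 1) (String.ofList h))).toList
        = pvJoin1 (List.replicate (s.toList.count '/' + 1) h) := by
      rw [PySem.Str.toList_join]
      have : List.map String.toList (List.replicate (s.toList.count '/' + 1) (String.ofList h))
          = List.replicate (s.toList.count '/' + 1) h := by
        simp [List.map_replicate, String.toList_ofList]
      rw [this]
      have : "/".toList = ['/'] := rfl
      rw [this, pvJoin1_eq_join]
    rw [Bool.eq_iff_iff]
    simp only [beq_iff_eq, decide_eq_true_iff]
    constructor
    · intro he
      have : s.toList = pvJoin1 (List.replicate (s.toList.count '/' + 1) h) := by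
        conv_lhs => rw [he, hjoin]
      exact (pvMain s.toList).mp this
    · intro hall
      have := (pvMain s.toList).mpr hall
      apply String.toList_injective
      rw [hjoin, ← this]
  rw [hcount, hB, hsplit]
  -- now reduce A to the same proposition
  cases hp : pvSplit1 s.toList with
  | nil => exact absurd hp (pvSplit1_ne_nil s.toList)
  | cons a r =>
    have hhead : a = h := by
      have := pvSplit1_head s.toList
      rw [hp] at this
      simpa using this
    cases r with
    | nil =>
      simp only [List.map_cons, List.map_nil, List.length_cons, List.length_nil]
      rw [if_pos (by omega)]
      have : ∀ x ∈ ([a] : List (List Char)), x = h := by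
        intro x hx; simp at hx; subst hx; exact hhead
      simp [this]
    | cons b t =>
      simp only [List.map_cons, List.length_cons]
      rw [if_neg (by simp)]
      simp only [List.headD_cons, PySem.List.slice_from_one, List.tail_cons]
      rw [Bool.eq_iff_iff, pvCheckLoop_eq_true_iff, decide_eq_true_iff]
      constructor
      · intro hall x hx
        rcases List.mem_cons.mp hx with hx | hx
        · exact hx.trans hhead
        · have h1 := hall (String.ofList x) (List.mem_map_of_mem hx)
          exact (String.ofList_inj.mp h1).trans hhead
      · intro hall x hx
        rw [← List.map_cons] at hx
        obtain ⟨y, hy, rfl⟩ := List.mem_map.mp hx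
        have hy : y ∈ b :: t := hy
        have hyh : y = h := hall y (List.mem_cons_of_mem _ hy)
        rw [hyh, hhead]

-- ===== VERDICT (by name: the statement is the Claim_ definition above) =====
theorem check_video_uri_spec : Claim_equal_check_video_uri := by
  intro v _
  unfold Spec_check_video_uri
  exact check_eq v
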